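-- pv_equiv track=rewrite | github.com/XAI-and-GBTMs/XAI-and-GBTMs | verification/verify_ltr.py | get_group_slices
-- ===== SOURCE A (Python) =====
-- def get_group_slices(qids):
--     """Return (start, end) slices for each contiguous query group."""
--     slices = []
--     start = 0
--
--     for i in range(1, len(qids)):
--         if qids[i] != qids[i - 1]:
--             slices.append((start, i))
--             start = i
--     slices.append((start, len(qids)))
--
--     return slices
-- ===== SOURCE B (Python) =====
-- def get_group_slices(qids):
--     """Return (start, end) slices for each contiguous query group."""
--     n = len(qids)
--     slices = []
--     start = 0
--     while True:
--         end = start + 1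
--         while end < n and qids[end] == qids[start]:
--             end += 1
--         if end < n:
--             slices.append((start, end))
--             start = end
--         else:
--             slices.append((start, n))
--             return slices
-- ===== Notes on version B (the rewrite author's own statement) =====
-- stated objective: alternative
-- what changed: Instead of one pass testing every adjacent pair and threading a running start, B runs an outer loop once per group whose inner scan extends the group by comparing each element to the group's first element (its representative), emitting the slice when the run ends.
import Mathlib
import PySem

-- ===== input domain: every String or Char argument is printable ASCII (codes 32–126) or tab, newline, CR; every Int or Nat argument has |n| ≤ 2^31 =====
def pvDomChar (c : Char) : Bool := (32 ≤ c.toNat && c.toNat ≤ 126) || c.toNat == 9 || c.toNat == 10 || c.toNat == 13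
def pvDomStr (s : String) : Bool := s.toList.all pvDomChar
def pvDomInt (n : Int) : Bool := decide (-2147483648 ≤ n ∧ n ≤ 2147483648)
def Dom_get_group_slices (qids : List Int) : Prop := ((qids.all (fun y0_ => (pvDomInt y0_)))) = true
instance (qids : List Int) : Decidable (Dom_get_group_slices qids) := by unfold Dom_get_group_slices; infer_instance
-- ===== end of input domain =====

-- B replaces A's single adjacent-pair pass (running 'start' state) by an outer loop per group whose
-- inner scan extends the group by comparing elements to the group's FIRST element; same cost, different algorithm.

-- ===== PORT A =====
-- One pass over range(1, n): on a change of qid, append (start, i) and reset start; finally append (start, n).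
def get_group_slices (qids : List Int) : List (Int × Int) :=
  let r := (PySem.List.pyRange 1 (qids.length) 1).foldl
    (fun (acc : List (Int × Int) × Int) (i : Int) =>
      if PySem.List.pyGet? qids i ≠ PySem.List.pyGet? qids (i - 1) then
        (acc.1 ++ [(acc.2, i)], i)
      else acc)
    ([], 0)
  r.1 ++ [(r.2, (qids.length : Int))]

-- ===== PORT B =====
-- inner while of Source B: 'end += 1 while end < n and qids[end] == qids[start]'
def pvScanB (qids : List Int) (s : Nat) (e : Nat) : Nat :=
  if h : e < qids.length ∧ qids[e]? = qids[s]? then pvScanB qids s (e + 1) else e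
  termination_by qids.length - e
  decreasing_by omega

-- the inner while never moves 'end' backwards (termination fact for the outer loop, cited in decreasing_by)
theorem pvScanB_ge (qids : List Int) (s e : Nat) : e ≤ pvScanB qids s e := by
  fun_induction pvScanB qids s e with
  | case1 e h ih => omega
  | case2 e h => omega

-- outer 'while True' of Source B: scan the run from start, append the slice, advance start or return
def pvOuterB (qids : List Int) (start : Nat) (slices : List (Int × Int)) : List (Int × Int) :=
  let e := pvScanB qids start (start + 1)
  if h : e < qids.length then
    pvOuterB qids e (slices ++ [((start : Int), (e : Int))])
  else
    slices ++ [((start : Int), (qids.length : Int))]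
  termination_by qids.length - start
  decreasing_by have := pvScanB_ge qids start (start + 1); omega

def get_group_slices_alt (qids : List Int) : List (Int × Int) :=
  pvOuterB qids 0 []

-- ===== PRECONDITION & SPEC =====
def Spec_get_group_slices (qids : List Int) (out : List (Int × Int)) : Prop := out = get_group_slices_alt qids
instance (qids : List Int) (out : List (Int × Int)) : Decidable (Spec_get_group_slices qids out) := by unfold Spec_get_group_slices; infer_instance

-- ===== CLAIM (what is proved, stated in full; the proofs are below) =====
def Claim_equal_get_group_slices : Prop := ∀ (qids : List Int), Dom_get_group_slices qids → Spec_get_group_slices qids (get_group_slices qids)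

-- ===== LEMMAS AND PROOFS =====

-- length of the leading run of x in t
def pvRun (x : Int) : List Int → Nat
  | [] => 0
  | y :: r => if y = x then pvRun x r + 1 else 0

-- 0-based positions j with t[j] ≠ (x::t)[j] (a group cut between index j and j+1 of x::t)
def pvCuts (x : Int) : List Int → List Nat
  | [] => []
  | y :: r => if y = x then (pvCuts y r).map (· + 1) else 0 :: (pvCuts y r).map (· + 1)

theorem pvRun_le (x : Int) (t : List Int) : pvRun x t ≤ t.length := by
  induction t generalizing x with
  | nil => simp [pvRun]
  | cons y r ih =>
    simp only [pvRun, List.length_cons]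
    split
    · have := ih x; omega
    · omega

-- A's filtered cut indices are pvCuts (index world → structural world)
theorem pvFilter_range_eq_cuts (x : Int) (t : List Int) :
    (List.range t.length).filter (fun k => decide (¬ t[k]? = (x :: t)[k]?)) = pvCuts x t := by
  induction t generalizing x with
  | nil => simp [pvCuts]
  | cons y r ih =>
    rw [List.length_cons, List.range_succ_eq_map, List.filter_cons, List.filter_map]
    have h2 : (List.range r.length).filter
        ((fun k => decide (¬ (y :: r)[k]? = (x :: y :: r)[k]?)) ∘ Nat.succ)
        = (List.range r.length).filter (fun k => decide (¬ r[k]? = (y :: r)[k]?)) := by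
      apply List.filter_congr
      intro k _
      simp [Function.comp]
    rw [h2, ih y]
    by_cases hxy : y = x
    · subst hxy
      simp [pvCuts]
    · have hp : (decide ¬((y :: r)[0]? = (x :: y :: r)[0]?)) = true := by simp [hxy]
      simp only [hp, if_true]
      simp [pvCuts, hxy]

theorem pvCuts_run_nil (x : Int) (t : List Int) (h : t.drop (pvRun x t) = []) :
    pvCuts x t = [] := by
  induction t generalizing x with
  | nil => simp [pvCuts]
  | cons y r ih =>
    by_cases hxy : y = x
    · subst hxy
      rw [pvRun, if_pos rfl, List.drop_succ_cons] at h
      rw [pvCuts, if_pos rfl, ih y h]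
      simp
    · rw [pvRun, if_neg hxy, List.drop_zero] at h
      exact absurd h (by simp)

theorem pvCuts_run_cons (x : Int) (t : List Int) (y : Int) (r : List Int)
    (h : t.drop (pvRun x t) = y :: r) :
    pvCuts x t = pvRun x t :: (pvCuts y r).map (· + (pvRun x t + 1)) := by
  induction t generalizing x with
  | nil => simp at h
  | cons z s ih =>
    by_cases hzx : z = x
    · subst hzx
      rw [pvRun, if_pos rfl, List.drop_succ_cons] at h
      rw [pvCuts, if_pos rfl, ih z h, pvRun, if_pos rfl]
      simp [List.map_map, Function.comp_def, Nat.add_assoc]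
    · rw [pvRun, if_neg hzx, List.drop_zero] at h
      cases h
      rw [pvCuts, if_neg hzx, pvRun, if_neg hzx]

-- pvPairsFrom st bs = the (start, end) pairs produced by A's loop from state start = st over cut points bs
def pvPairsFrom (st : Int) : List Int → List (Int × Int)
  | [] => []
  | i :: r => (st, i) :: pvPairsFrom i r

-- pvLastFrom st bs = the running 'start' after processing cut points bs
def pvLastFrom (st : Int) : List Int → Int
  | [] => st
  | i :: r => pvLastFrom i r

-- structural reference for both programs: emit the first run's slice, recurse on the rest
def pvGoR (xs : List Int) (off : Nat) : List (Int × Int) :=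
  match xs with
  | [] => [((off : Int), (off : Int))]
  | x :: t =>
    if 1 + pvRun x t < t.length + 1 then
      ((off : Int), ((off + 1 + pvRun x t : Nat) : Int))
        :: pvGoR (t.drop (pvRun x t)) (off + 1 + pvRun x t)
    else [((off : Int), ((off + t.length + 1 : Nat) : Int))]
  termination_by xs.length
  decreasing_by simp

-- pvGoR emits exactly A's pairs-of-cuts shape
theorem pvGoR_eq_pairs (t : List Int) (x : Int) (off : Nat) :
    pvGoR (x :: t) off
      = pvPairsFrom (off : Int) ((pvCuts x t).map (fun j => ((off + 1 + j : Nat) : Int)))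
        ++ [(pvLastFrom (off : Int) ((pvCuts x t).map (fun j => ((off + 1 + j : Nat) : Int))),
             ((off + t.length + 1 : Nat) : Int))] := by
  induction hn : t.length using Nat.strong_induction_on generalizing t x off with
  | _ n ih =>
  subst hn
  cases hd : t.drop (pvRun x t) with
  | nil =>
    have hrun : pvRun x t = t.length := by
      have h1 := pvRun_le x t
      have := List.drop_eq_nil_iff.mp hd
      omega
    rw [pvGoR, if_neg (by omega), pvCuts_run_nil x t hd]
    simp [pvPairsFrom, pvLastFrom]
  | cons y r =>
    have hlen : t.length = pvRun x t + 1 + r.length := by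
      have := congrArg List.length hd
      simp only [List.length_drop, List.length_cons] at this
      have := pvRun_le x t
      omega
    rw [pvGoR, if_pos (by omega), pvCuts_run_cons x t y r hd, hd]
    rw [ih r.length (by omega) r y (off + 1 + pvRun x t) rfl]
    simp only [List.map_cons, List.map_map, Function.comp_def, pvPairsFrom, pvLastFrom]
    rw [show (fun j => ((off + 1 + pvRun x t + 1 + j : Nat) : Int))
          = (fun j => ((off + 1 + (j + (pvRun x t + 1)) : Nat) : Int)) from by funext j; congr 1; omega,
        show off + 1 + pvRun x t + r.length + 1 = off + t.length + 1 from by omega]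
    simp [List.cons_append]

-- the inner while scan = start of run + run length
theorem pvScanB_eq (qids : List Int) (s : Nat) (x : Int) (hs : qids[s]? = some x) :
    ∀ (u : List Int) (e : Nat), qids.drop e = u → pvScanB qids s e = e + pvRun x u := by
  intro u
  induction u generalizing s with
  | nil =>
    intro e hu
    have hle : qids.length ≤ e := by
      have := List.drop_eq_nil_iff.mp hu; omega
    rw [pvScanB, dif_neg (by omega)]
    simp [pvRun]
  | cons y r ih =>
    intro e hu
    have he : e < qids.length := by
      by_contra h
      rw [List.drop_eq_nil_iff.mpr (by omega)] at hu
      exact absurd hu (by simp)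
    have hey : qids[e]? = some y := by
      have h0 : (qids.drop e)[0]? = qids[e + 0]? := List.getElem?_drop
      rw [hu] at h0; simpa using h0.symm
    have hdr : qids.drop (e + 1) = r := by
      have h1 : qids.drop (e + 1) = (qids.drop e).drop 1 := by rw [List.drop_drop]
      rw [h1, hu]; simp
    by_cases hyx : y = x
    · subst hyx
      rw [pvScanB, dif_pos ⟨he, by rw [hey, hs]⟩, ih s hs (e + 1) hdr]
      rw [pvRun, if_pos rfl]
      omega
    · rw [pvScanB, dif_neg (by rw [hey, hs]; simp [hyx]), pvRun, if_neg hyx]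
      omega

-- the outer while from 'start' appends pvGoR of the remaining suffix
theorem pvOuterB_eq (qids : List Int) :
    ∀ (d start : Nat) (slices : List (Int × Int)), qids.length - start = d → start ≤ qids.length →
      pvOuterB qids start slices = slices ++ pvGoR (qids.drop start) start := by
  intro d
  induction d using Nat.strong_induction_on with
  | _ d ih =>
  intro start slices hd hle
  cases hu : qids.drop start with
  | nil =>
    have hstart : start = qids.length := by
      have := List.drop_eq_nil_iff.mp hu; omega
    have hscan : pvScanB qids start (start + 1) = start + 1 := by
      rw [pvScanB, dif_neg (by omega)]
    rw [pvOuterB]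
    simp only [hscan, dif_neg (by omega : ¬ start + 1 < qids.length)]
    rw [pvGoR, hstart]
  | cons x t =>
    have hlt : start < qids.length := by
      by_contra h
      rw [List.drop_eq_nil_iff.mpr (by omega)] at hu
      exact absurd hu (by simp)
    have hsx : qids[start]? = some x := by
      have h0 : (qids.drop start)[0]? = qids[start + 0]? := List.getElem?_drop
      rw [hu] at h0; simpa using h0.symm
    have hdt : qids.drop (start + 1) = t := by
      have h1 : qids.drop (start + 1) = (qids.drop start).drop 1 := by rw [List.drop_drop]
      rw [h1, hu]; simp
    have hlen : qids.length = start + 1 + t.length := by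
      have := congrArg List.length hu
      simp only [List.length_drop, List.length_cons] at this
      omega
    have hscan : pvScanB qids start (start + 1) = start + 1 + pvRun x t :=
      pvScanB_eq qids start x hsx t (start + 1) hdt
    have hrle := pvRun_le x t
    rw [pvOuterB]
    simp only [hscan]
    by_cases hcase : start + 1 + pvRun x t < qids.length
    · rw [dif_pos hcase]
      rw [ih (qids.length - (start + 1 + pvRun x t)) (by omega)
            (start + 1 + pvRun x t) (slices ++ [((start : Int), ((start + 1 + pvRun x t : Nat) : Int))])
            rfl (by omega)]
      have hdrop : qids.drop (start + 1 + pvRun x t) = t.drop (pvRun x t) := by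
        rw [← hdt, List.drop_drop]
      rw [hdrop, pvGoR, if_pos (by omega)]
      simp [List.append_assoc]
    · rw [dif_neg hcase]
      rw [pvGoR, if_neg (by omega), show qids.length = start + t.length + 1 from by omega]

-- A's fold, on any index list L, appends exactly the pairs of the filtered cut points and ends at their last element.
theorem pvFold_inv (p : Int → Prop) [DecidablePred p] (L : List Int) (s : List (Int × Int)) (st : Int) :
    L.foldl (fun (acc : List (Int × Int) × Int) (i : Int) =>
      if p i then (acc.1 ++ [(acc.2, i)], i) else acc) (s, st)
    = (s ++ pvPairsFrom st (L.filter (fun i => decide (p i))),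
       pvLastFrom st (L.filter (fun i => decide (p i)))) := by
  induction L generalizing s st with
  | nil => simp [pvPairsFrom, pvLastFrom]
  | cons i L ih =>
    by_cases h : p i
    · simp [List.foldl_cons, h, ih, pvPairsFrom, pvLastFrom, List.append_assoc]
    · simp [List.foldl_cons, h, ih]

-- ===== VERDICT (by name: the statement is the Claim_ definition above) =====
theorem get_group_slices_spec : Claim_equal_get_group_slices := by
  intro qids _
  show get_group_slices qids = get_group_slices_alt qids
  rw [get_group_slices_alt, pvOuterB_eq qids (qids.length - 0) 0 [] rfl (by omega)]
  simp only [List.drop_zero, List.nil_append]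
  cases qids with
  | nil =>
    unfold get_group_slices
    rw [pvGoR]
    simp [PySem.List.pyRange_one_eq_nil]
  | cons x t =>
    unfold get_group_slices
    rw [pvFold_inv (fun i => PySem.List.pyGet? (x :: t) i ≠ PySem.List.pyGet? (x :: t) (i - 1))]
    simp only [List.nil_append]
    rw [pvGoR_eq_pairs t x 0]
    have hF : ((PySem.List.pyRange 1 ((x :: t).length) 1).filter
        (fun i => decide (PySem.List.pyGet? (x :: t) i ≠ PySem.List.pyGet? (x :: t) (i - 1))))
        = (pvCuts x t).map (fun j => ((0 + 1 + j : Nat) : Int)) := by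
      rw [PySem.List.pyRange_one, List.filter_map]
      rw [show (((x :: t).length : Int) - 1).toNat = t.length by simp]
      rw [← pvFilter_range_eq_cuts x t]
      rw [List.filter_congr (q := fun k => decide (¬ t[k]? = (x :: t)[k]?))]
      · apply List.map_congr_left
        intro k _
        push_cast
        ring_nf
      · intro k _
        simp only [Function.comp_def]
        rw [show (1 : Int) + (k : Int) = ((k + 1 : Nat) : Int) from by push_cast; ring]
        rw [show ((k + 1 : Nat) : Int) - 1 = ((k : Nat) : Int) from by push_cast; ring]
        rw [PySem.List.pyGet?_natCast, PySem.List.pyGet?_natCast]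
        simp
    rw [hF]
    congr 1
    simp
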